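-- pv_equiv track=rewrite | github.com/dorissoolyate/palgad | palgad/modulepalgad1.py | suurim_palk
-- ===== SOURCE A (Python) =====
-- def suurim_palk(i:list,p:list)->list:
--     """naitab kellel on suurim palk
--
--     """
--     nimed=[]
--     max_palk=max(p)
--     ind=p.index(max_palk)
--     for palk in p:
--         if max_palk==palk:
--             nimi=i[p.index(palk,ind)]
--             nimed.append(nimi)
--             ind+=1
--     return nimed
-- ===== SOURCE B (Python) =====
-- def suurim_palk(i: list, p: list) -> list:
--     """naitab kellel on suurim palk"""
--     max_palk = max(p)
--     return [nimi for nimi, palk in zip(i, p) if palk == max_palk]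
-- ===== Notes on version B (the rewrite author's own statement) =====
-- stated objective: simpler
-- what changed: Replaced the loop that re-scans p with p.index(palk, ind) for every maximal element by a single comprehension over zip(i, p) that picks each name whose own salary equals the maximum.
-- intended difference: When the maximum occurs at three or more positions that are not consecutive (apart from the last one), A's by-one incremented search index re-reads an earlier name and returns duplicates (e.g. ['a','c','c']), while B returns the name at each maximal position (['a','c','e']), which is what 'names with the maximum salary' means. — e.g. on suurim_palk(["a", "b", "c", "d", "e"], [5, 0, 5, 0, 5]): A returns ["a", "c", "c"], B returns ["a", "c", "e"]
-- outside the precondition, e.g. on suurim_palk(['a', 'b', 'c'], [5, 0, 5, 0, 5]): A returns ['a', 'c', 'c'], B returns ['a', 'c']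
import Mathlib
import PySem

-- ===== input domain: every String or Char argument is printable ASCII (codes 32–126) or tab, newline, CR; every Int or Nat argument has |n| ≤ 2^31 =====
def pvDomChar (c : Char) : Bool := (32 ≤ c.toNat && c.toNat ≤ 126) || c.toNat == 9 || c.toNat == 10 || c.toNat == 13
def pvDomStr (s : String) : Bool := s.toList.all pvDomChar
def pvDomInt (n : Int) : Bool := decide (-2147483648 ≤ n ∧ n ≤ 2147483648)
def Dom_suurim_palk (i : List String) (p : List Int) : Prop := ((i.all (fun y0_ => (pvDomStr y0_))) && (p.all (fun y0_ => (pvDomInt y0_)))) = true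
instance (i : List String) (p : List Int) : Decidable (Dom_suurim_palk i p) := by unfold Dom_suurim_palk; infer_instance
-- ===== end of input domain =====

-- B replaces A's loop that re-scans p with p.index(palk, ind) by one zip-filter pass (objective: simpler);
-- on D_ inputs (non-consecutive maximum positions) A returns duplicated names, B the name at each maximal position.

-- ===== PORT A =====
-- p.index(v, start) for a nonnegative start (the only use in A): start + first index of v in p[start:]; none = ValueError
def pvIndexFrom (p : List Int) (v : Int) (start : Nat) : Option Nat :=
  (PySem.List.index? (p.drop start) v).map (· + start)

-- the body of A's for-loop, acting on the state (ind, nimed)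
def pvStepA (i : List String) (p : List Int) (maxPalk : Int)
    (st : Nat × List String) (palk : Int) : Nat × List String :=
  if maxPalk == palk then
    match pvIndexFrom p palk st.1 with
    | none => (st.1 + 1, st.2)          -- p.index raises ValueError; unreachable (an occurrence ≥ ind always exists)
    | some j =>
      match PySem.List.pyGet? i (j : Int) with
      | none => (st.1 + 1, st.2)        -- i[...] raises IndexError; excluded by Pre_
      | some nimi => (st.1 + 1, st.2 ++ [nimi])
  else st

def suurim_palk (i : List String) (p : List Int) : List String :=
  match PySem.List.max? p (fun x => x) with
  | none => []                           -- max([]) raises ValueError; excluded by Pre_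
  | some maxPalk =>
    match PySem.List.index? p maxPalk with
    | none => []                         -- unreachable: the maximum is an element of p
    | some ind => (p.foldl (pvStepA i p maxPalk) (ind, [])).2

-- ===== PORT B =====
def suurim_palk_alt (i : List String) (p : List Int) : List String :=
  match PySem.List.max? p (fun x => x) with
  | none => []                           -- max([]) raises ValueError; excluded by Pre_
  | some maxPalk => ((i.zip p).filter (fun np => np.2 == maxPalk)).map Prod.fst

-- ===== PRECONDITION & SPEC =====
-- the largest value of p (0 for the empty list, which Pre_ excludes)
def pvMax (p : List Int) : Int :=
  match p with
  | [] => 0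
  | x :: t => t.foldl max x

-- positions (counted from k) at which the value M occurs
def posFrom (k : Nat) (M : Int) : List Int → List Nat
  | [] => []
  | x :: t => if x == M then k :: posFrom (k+1) M t else posFrom (k+1) M t

-- the (increasing) list of indices of p that hold the maximal value
def maxPositions (p : List Int) : List Nat := posFrom 0 (pvMax p) p

-- Pre_ excludes empty p (max([]) raises ValueError) and inputs where some maximal element sits at an index ≥ len(i),
-- where A's i[...] ordinarily raises IndexError; on a few mismatched-length inputs of the latter kind A still returns
-- because its buggy re-scan never reaches that index — see the cite in claim.json.
def Pre_suurim_palk (i : List String) (p : List Int) : Prop :=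
  p ≠ [] ∧ ∀ k ∈ maxPositions p, k < i.length
instance (i : List String) (p : List Int) : Decidable (Pre_suurim_palk i p) := by
  unfold Pre_suurim_palk; infer_instance

def pvWitness_suurim_palk : List String × List Int := (["a", "b"], [3, 7])

-- the position A's re-scan reads for the c-th maximal element: the first maximal position ≥ (first one + c)
def pvReadPos (js : List Nat) (c : Nat) : Nat :=
  (js.filter (fun j => js.headD 0 + c ≤ j)).headD 0

-- When the maximal positions are not one consecutive run, A's by-one incremented search index re-reads an
-- earlier name and returns duplicates, while B returns the name at each maximal position, which is what
-- "names with the maximum salary" means; D_ holds exactly when some re-read name differs from the true one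
-- (the first conjunct is implied by the second; it is stated so that D_ is cheap to decide).
def D_suurim_palk (i : List String) (p : List Int) : Prop :=
  (maxPositions p).dropLast ≠ List.range' ((maxPositions p).headD 0) ((maxPositions p).length - 1)
  ∧ ∃ c ∈ List.range (maxPositions p).length,
      i.getD (pvReadPos (maxPositions p) c) "" ≠ i.getD ((maxPositions p).getD c 0) ""
instance (i : List String) (p : List Int) : Decidable (D_suurim_palk i p) := by
  unfold D_suurim_palk; infer_instance

def Spec_suurim_palk (i : List String) (p : List Int) (out : List String) : Prop :=
  ¬ D_suurim_palk i p → out = suurim_palk_alt i p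
instance (i : List String) (p : List Int) (out : List String) : Decidable (Spec_suurim_palk i p out) := by
  unfold Spec_suurim_palk; infer_instance

def pvDiffWitness_suurim_palk : List String × List Int := (["a", "b", "c", "d", "e"], [5, 0, 5, 0, 5])
def pvDiffWitnessOut_suurim_palk : (List String) × (List String) := (["a", "c", "c"], ["a", "c", "e"])

-- ===== CLAIM (what is proved, stated in full; the proofs are below) =====
def Claim_unchanged_suurim_palk : Prop := ∀ (i : List String) (p : List Int), Dom_suurim_palk i p → Pre_suurim_palk i p → Spec_suurim_palk i p (suurim_palk i p)
def Claim_changed_suurim_palk : Prop := Dom_suurim_palk (pvDiffWitness_suurim_palk.1) (pvDiffWitness_suurim_palk.2) ∧ Pre_suurim_palk (pvDiffWitness_suurim_palk.1) (pvDiffWitness_suurim_palk.2) ∧ D_suurim_palk (pvDiffWitness_suurim_palk.1) (pvDiffWitness_suurim_palk.2) ∧ suurim_palk (pvDiffWitness_suurim_palk.1) (pvDiffWitness_suurim_palk.2) = pvDiffWitnessOut_suurim_palk.1 ∧ suurim_palk_alt (pvDiffWitness_suurim_palk.1) (pvDiffWitness_suurim_palk.2) = pvDiffWitnessOut_suurim_palk.2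 ∧ pvDiffWitnessOut_suurim_palk.1 ≠ pvDiffWitnessOut_suurim_palk.2
def Claim_exact_suurim_palk : Prop := ∀ (i : List String) (p : List Int), Dom_suurim_palk i p → Pre_suurim_palk i p → D_suurim_palk i p → suurim_palk i p ≠ suurim_palk_alt i p

-- ===== LEMMAS AND PROOFS =====
-- the list of indices of p that hold the value M (proof-side view of maxPositions once the maximum M is fixed)
def posOf (p : List Int) (M : Int) : List Nat :=
  (List.range p.length).filter (fun k => p.getD k 0 == M)

theorem mem_posOf {p : List Int} {M : Int} {k : Nat} :
    k ∈ posOf p M ↔ k < p.length ∧ p.getD k 0 = M := by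
  simp [posOf, List.mem_filter, List.mem_range]

theorem posOf_pairwise (p : List Int) (M : Int) : (posOf p M).Pairwise (· < ·) :=
  (List.pairwise_lt_range).filter _

theorem posOf_cons (x : Int) (p : List Int) (M : Int) :
    posOf (x :: p) M = (if x == M then [0] else []) ++ (posOf p M).map (· + 1) := by
  show (List.range (p.length + 1)).filter _ = _
  rw [List.range_succ_eq_map, List.filter_cons, List.filter_map]
  by_cases h : x == M <;> simp [h, posOf, Function.comp_def]

theorem length_posOf (p : List Int) (M : Int) :
    (posOf p M).length = (p.filter (fun x => M == x)).length := by
  induction p with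
  | nil => simp [posOf]
  | cons x t ih =>
    rw [posOf_cons, List.filter_cons]
    by_cases h : x == M
    · have h' : (M == x) = true := by simp at h ⊢; omega
      simp [h, h', ih]
    · have h' : (M == x) = false := by simp at h ⊢; omega
      simp [h, h', ih]

theorem getD_drop (l : List Int) (n m : Nat) (d : Int) : (l.drop n).getD m d = l.getD (n + m) d := by
  simp [List.getD, List.getElem?_drop]

theorem headD_eq_getElem (l : List Nat) (h : 0 < l.length) : l.headD 0 = l[0] := by
  cases l with
  | nil => simp at h
  | cons a t => simp

theorem posFrom_eq (M : Int) :
    ∀ (p : List Int) (k : Nat), posFrom k M p = (posOf p M).map (· + k) := by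
  intro p
  induction p with
  | nil => intro k; simp [posFrom, posOf]
  | cons x t ih =>
    intro k
    rw [posFrom, posOf_cons, List.map_append, List.map_map, ih (k+1)]
    by_cases hx : x == M
    · rw [if_pos hx, if_pos hx]
      simp [Function.comp_def, Nat.add_assoc, Nat.add_comm 1 k]
    · rw [if_neg hx, if_neg hx]
      simp [Function.comp_def, Nat.add_assoc, Nat.add_comm 1 k]

theorem maxPositions_eq_posOf (p : List Int) (M : Int)
    (hM : PySem.List.max? p (fun x => x) = some M) : maxPositions p = posOf p M := by
  have hMax : pvMax p = M := by
    cases p with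
    | nil =>
      rw [(PySem.List.max?_eq_none_iff ([] : List Int) (fun x => x)).mpr rfl] at hM
      cases hM
    | cons x t =>
      rw [PySem.List.max?_id_cons] at hM
      rw [pvMax]
      exact Option.some.inj hM
  rw [maxPositions, hMax, posFrom_eq M p 0]
  simp

theorem foldA_filter (i : List String) (p : List Int) (M : Int) :
    ∀ (l : List Int) (st : Nat × List String),
      l.foldl (pvStepA i p M) st = (l.filter (fun x => M == x)).foldl (pvStepA i p M) st := by
  intro l
  induction l with
  | nil => intro st; rfl
  | cons x t ih =>
    intro st
    rw [List.foldl_cons, List.filter_cons]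
    by_cases h : M == x
    · simp only [h]; rw [if_pos trivial, List.foldl_cons, ih]
    · have hstep : pvStepA i p M st x = st := by
        simp [pvStepA, h]
      simp only [h]
      rw [if_neg (by simp), hstep, ih]

theorem index?_eq_of_first (xs : List Int) (v : Int) :
    ∀ (k : Nat), k < xs.length → xs.getD k 0 = v → (∀ j, j < k → xs.getD j 0 ≠ v) →
    PySem.List.index? xs v = some k := by
  induction xs with
  | nil => intro k hk; simp at hk
  | cons x t ih =>
    intro k hk hv hmin
    by_cases hx : x = v
    · have hk0 : k = 0 := by
        by_contra h0
        exact hmin 0 (Nat.pos_of_ne_zero h0) (by simpa using hx)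
      subst hk0; subst hx
      exact PySem.List.index?_cons_self (x := x) (xs := t)
    · have hk0 : k ≠ 0 := by
        intro h; subst h; exact hx (by simpa using hv)
      obtain ⟨k', rfl⟩ := Nat.exists_eq_succ_of_ne_zero hk0
      rw [PySem.List.index?_cons_of_ne t hx,
        ih k' (by simpa using hk) (by simpa using hv)
          (fun j hj hc => hmin (j+1) (by omega) (by simpa using hc))]
      rfl

-- a strictly increasing list of naturals grows at least by one per step
theorem getElem_ge_head_add (js : List Nat) (hp : js.Pairwise (· < ·)) :
    ∀ c (hc : c < js.length), js.headD 0 + c ≤ js[c] := by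
  intro c
  induction c with
  | zero => intro hc; rw [headD_eq_getElem js (by omega)]; omega
  | succ c' ih =>
    intro hc
    have h1 := ih (by omega)
    have h2 := (List.pairwise_iff_getElem.mp hp) c' (c'+1) (by omega) hc (by omega)
    omega

-- the head of a sorted list is its minimum
theorem headD_min (js : List Nat) (hp : js.Pairwise (· < ·)) :
    ∀ t ∈ js, js.headD 0 ≤ t := by
  cases js with
  | nil => intro t ht; simp at ht
  | cons a l =>
    intro t ht
    rcases List.mem_cons.mp ht with h | h
    · simp [h]
    · have := (List.pairwise_cons.mp hp).1 t h
      simp; omega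

-- when the positions are one consecutive run (apart from the last), they satisfy js[c] = js[0] + c
theorem consec_of_notD (js : List Nat)
    (hE : js.dropLast = List.range' (js.headD 0) (js.length - 1)) :
    ∀ c, c + 1 < js.length → js.getD c 0 = js.headD 0 + c := by
  intro c hc
  have hdl : c < js.dropLast.length := by simp [List.length_dropLast]; omega
  have h1 : js.dropLast[c] = js[c]'(by omega) := List.getElem_dropLast _
  have h2 : js.dropLast[c] = js.headD 0 + c := by
    rw [List.getElem_of_eq hE hdl, List.getElem_range']
    omega
  rw [List.getD_eq_getElem _ _ (by omega), ← h1, h2]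

-- on a consecutive run A's re-read position is the true position
theorem consecReads (p : List Int) (M : Int)
    (hE : (posOf p M).dropLast = List.range' ((posOf p M).headD 0) ((posOf p M).length - 1)) :
    ∀ c, c < (posOf p M).length → pvReadPos (posOf p M) c = (posOf p M).getD c 0 := by
  intro c hc
  set js := posOf p M with hjs
  set j0 := js.headD 0 with hj0
  have hpair : js.Pairwise (· < ·) := posOf_pairwise p M
  have hcons := consec_of_notD js hE
  set F := js.filter (fun j => j0 + c ≤ j) with hF
  have hFpair : F.Pairwise (· < ·) := hpair.filter _
  have hcF : js[c] ∈ F := by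
    rw [hF]
    refine List.mem_filter.mpr ⟨List.getElem_mem _, ?_⟩
    simp only [decide_eq_true_eq, hj0]
    exact getElem_ge_head_add js hpair c hc
  have hmin : ∀ t ∈ F, js[c] ≤ t := by
    intro t ht
    have htjs : t ∈ js := (List.mem_filter.mp ht).1
    have htge : j0 + c ≤ t := by
      have := (List.mem_filter.mp ht).2; simpa using this
    obtain ⟨c'', hc'', he⟩ := List.mem_iff_getElem.mp htjs
    rcases Nat.lt_or_ge c'' c with hlt | hge
    · have h1 : js.getD c'' 0 = j0 + c'' := hcons c'' (by omega)
      rw [List.getD_eq_getElem _ _ hc''] at h1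
      omega
    · rcases Nat.eq_or_lt_of_le hge with heq | hgt
      · subst heq; omega
      · have := (List.pairwise_iff_getElem.mp hpair) c c'' hc hc'' hgt
        omega
  have hFne : F ≠ [] := List.ne_nil_of_mem hcF
  have hhF : F.headD 0 ∈ F := by
    cases hFc : F with
    | nil => exact absurd hFc hFne
    | cons a l => simp
  have h1 : js[c] ≤ F.headD 0 := hmin _ hhF
  have h2 : F.headD 0 ≤ js[c] := headD_min F hFpair _ hcF
  have h3 : F.headD 0 = js[c] := le_antisymm h2 h1
  rw [pvReadPos, ← hj0, ← hF, h3, List.getD_eq_getElem _ _ hc]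

-- the value A reads at the c-th maximal element: the first occurrence of M at index ≥ js.headD 0 + c is pvReadPos js c
theorem nextOcc (p : List Int) (M : Int) (c : Nat) (hc : c < (posOf p M).length) :
    pvIndexFrom p M ((posOf p M).headD 0 + c) = some (pvReadPos (posOf p M) c) := by
  set js := posOf p M with hjs
  set j0 := js.headD 0 with hj0
  have hpair : js.Pairwise (· < ·) := posOf_pairwise p M
  set F := js.filter (fun j => j0 + c ≤ j) with hF
  have hFpair : F.Pairwise (· < ·) := hpair.filter _
  have hFne : F ≠ [] := by
    have hmem : js[c] ∈ F := by
      rw [hF]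
      refine List.mem_filter.mpr ⟨List.getElem_mem _, ?_⟩
      simp only [decide_eq_true_eq, hj0]
      exact getElem_ge_head_add js hpair c hc
    exact List.ne_nil_of_mem hmem
  have hrm : pvReadPos js c ∈ F := by
    rw [pvReadPos, ← hj0, ← hF]
    cases hFc : F with
    | nil => exact absurd hFc hFne
    | cons a l => simp
  have hrjs : pvReadPos js c ∈ js := (List.mem_filter.mp hrm).1
  have hrge : j0 + c ≤ pvReadPos js c := by
    have := (List.mem_filter.mp hrm).2; simpa using this
  have hrp : pvReadPos js c < p.length ∧ p.getD (pvReadPos js c) 0 = M := mem_posOf.mp hrjs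
  have hrmin : ∀ t ∈ F, pvReadPos js c ≤ t := by
    intro t ht
    have := headD_min F hFpair t ht
    rw [pvReadPos, ← hj0, ← hF]
    exact this
  have hidx : PySem.List.index? (p.drop (j0 + c)) M
      = some (pvReadPos js c - (j0 + c)) := by
    apply index?_eq_of_first
    · rw [List.length_drop]; omega
    · rw [getD_drop]
      have h3 : j0 + c + (pvReadPos js c - (j0 + c)) = pvReadPos js c := by omega
      rw [h3]; exact hrp.2
    · intro j hj
      rw [getD_drop]
      intro hcontra
      have hmem : (j0 + c + j) ∈ js := mem_posOf.mpr ⟨by omega, hcontra⟩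
      have hmemF : (j0 + c + j) ∈ F := by
        rw [hF]; exact List.mem_filter.mpr ⟨hmem, by simp⟩
      have := hrmin _ hmemF
      omega
  rw [pvIndexFrom, hidx]
  have h4 : pvReadPos js c - (j0 + c) + (j0 + c) = pvReadPos js c := by omega
  simp only [Option.map_some]
  rw [h4]

theorem foldA_main (i : List String) (p : List Int) (M : Int)
    (hlen : ∀ k ∈ posOf p M, k < i.length) :
    ∀ (l : List Int) (c : Nat) (ns : List String),
      (∀ x ∈ l, x = M) → l.length + c = (posOf p M).length →
      (l.foldl (pvStepA i p M) ((posOf p M).headD 0 + c, ns)).2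
        = ns ++ (List.range' c ((posOf p M).length - c)).map
            (fun c' => i.getD (pvReadPos (posOf p M) c') "") := by
  intro l
  induction l with
  | nil =>
    intro c ns _ hc
    have hc0 : c = (posOf p M).length := by simpa using hc
    rw [show (posOf p M).length - c = 0 by omega]
    simp
  | cons x t ih =>
    intro c ns hall hc
    have hx : x = M := hall x List.mem_cons_self
    have hc' : c < (posOf p M).length := by
      have := hc; simp [List.length_cons] at this; omega
    have hrjs : pvReadPos (posOf p M) c ∈ posOf p M := by
      have h := nextOcc p M c hc'
      -- membership was established inside nextOcc; re-derive it directly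
      set js := posOf p M with hjs
      have hpair : js.Pairwise (· < ·) := posOf_pairwise p M
      have hFne : js.filter (fun j => js.headD 0 + c ≤ j) ≠ [] := by
        have hmem : js[c] ∈ js.filter (fun j => js.headD 0 + c ≤ j) := by
          refine List.mem_filter.mpr ⟨List.getElem_mem _, ?_⟩
          simp only [decide_eq_true_eq]
          exact getElem_ge_head_add js hpair c hc'
        exact List.ne_nil_of_mem hmem
      have : pvReadPos js c ∈ js.filter (fun j => js.headD 0 + c ≤ j) := by
        rw [pvReadPos]
        cases hFc : js.filter (fun j => js.headD 0 + c ≤ j) with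
        | nil => exact absurd hFc hFne
        | cons a l => simp
      exact (List.mem_filter.mp this).1
    have hri : pvReadPos (posOf p M) c < i.length := hlen _ hrjs
    rw [List.foldl_cons]
    have hstep : pvStepA i p M ((posOf p M).headD 0 + c, ns) x
        = ((posOf p M).headD 0 + (c+1), ns ++ [i.getD (pvReadPos (posOf p M) c) ""]) := by
      subst hx
      rw [pvStepA, if_pos (by simp)]
      simp only [nextOcc p x c hc', PySem.List.pyGet?_natCast,
        List.getElem?_eq_getElem hri, List.getD_eq_getElem i _ hri]
      rfl
    rw [hstep, ih (c+1) _ (fun y hy => hall y (List.mem_cons_of_mem _ hy)) (by simp at hc ⊢; omega)]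
    rw [show (posOf p M).length - c = ((posOf p M).length - (c+1)) + 1 by omega,
      List.range'_succ, List.map_cons, List.append_assoc, List.singleton_append]

theorem index?_posOf (p : List Int) (M : Int) (hmem : M ∈ p) :
    PySem.List.index? p M = some ((posOf p M).headD 0) := by
  have hsome : (PySem.List.index? p M).isSome := (PySem.List.index?_isSome_iff p M).mpr hmem
  obtain ⟨k0, hk0⟩ := Option.isSome_iff_exists.mp hsome
  obtain ⟨hk0lt, hk0v, hk0min⟩ := PySem.List.getElem_of_index?_eq_some hk0
  have hk0mem : k0 ∈ posOf p M :=
    mem_posOf.mpr ⟨hk0lt, by rw [List.getD_eq_getElem _ _ hk0lt]; exact hk0v⟩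
  have hne : 0 < (posOf p M).length := List.length_pos_of_mem hk0mem
  have hj0 : (posOf p M).headD 0 = (posOf p M)[0] := headD_eq_getElem _ hne
  have hj0mem : (posOf p M)[0] ∈ posOf p M := List.getElem_mem _
  have hj0p := mem_posOf.mp hj0mem
  have h1 : ¬ ((posOf p M)[0] < k0) := by
    intro hlt
    exact hk0min _ hlt (by rw [← List.getD_eq_getElem _ _ (by omega)]; exact hj0p.2)
  have h2 : (posOf p M)[0] ≤ k0 := by
    rw [← hj0]; exact headD_min _ (posOf_pairwise p M) _ hk0mem
  have h3 : k0 = (posOf p M).headD 0 := by omega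
  rw [hk0, h3]

theorem altB_eq (M : Int) :
    ∀ (p : List Int) (i : List String), (∀ k ∈ posOf p M, k < i.length) →
      ((i.zip p).filter (fun np => np.2 == M)).map Prod.fst
        = (posOf p M).map (fun k => i.getD k "") := by
  intro p
  induction p with
  | nil => intro i _; simp [posOf]
  | cons x t ih =>
    intro i hlen
    cases i with
    | nil =>
      have hnil : posOf (x :: t) M = [] := by
        rw [List.eq_nil_iff_forall_not_mem]
        intro k hk
        exact absurd (hlen k hk) (by simp)
      simp [hnil]
    | cons a i' =>
      have hlen' : ∀ k ∈ posOf t M, k < i'.length := by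
        intro k hk
        have hmem : k + 1 ∈ posOf (x :: t) M := by
          rw [posOf_cons]; exact List.mem_append_right _ (List.mem_map_of_mem hk)
        have := hlen _ hmem
        simpa using this
      rw [posOf_cons]
      by_cases hx : x == M
      · rw [List.zip_cons_cons, List.filter_cons, if_pos (by simpa using hx)]
        rw [List.map_cons, ih i' hlen', if_pos hx]
        simp [Function.comp_def]
      · rw [List.zip_cons_cons, List.filter_cons, if_neg (by simpa using hx)]
        rw [ih i' hlen', if_neg (by simpa using hx)]
        simp [Function.comp_def]

-- B's output, re-indexed over the positions list
theorem altB_range (i : List String) (js : List Nat) :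
    js.map (fun k => i.getD k "") = (List.range js.length).map (fun c => i.getD (js.getD c 0) "") := by
  apply List.ext_getElem
  · simp
  · intro c h1 h2
    have hcl : c < js.length := by simpa using h1
    simp only [List.getElem_map, List.getElem_range]
    rw [List.getD_eq_getElem _ _ hcl]

-- both ports, under Pre_, as maps over range (posOf p M).length
theorem portA_eq (i : List String) (p : List Int) (M : Int)
    (hM : PySem.List.max? p (fun x => x) = some M)
    (hlen : ∀ k ∈ posOf p M, k < i.length) :
    suurim_palk i p
      = (List.range (posOf p M).length).map (fun c => i.getD (pvReadPos (posOf p M) c) "") := by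
  have hMmem : M ∈ p := PySem.List.max?_mem hM
  rw [suurim_palk, hM]
  simp only [index?_posOf p M hMmem]
  rw [foldA_filter i p M p ((posOf p M).headD 0, [])]
  have hmain := foldA_main i p M hlen (p.filter (fun x => M == x)) 0 []
    (fun y hy => by have := (List.mem_filter.mp hy).2; simp at this; omega)
    (by rw [length_posOf]; omega)
  rw [List.range_eq_range']
  simpa using hmain

theorem portB_eq (i : List String) (p : List Int) (M : Int)
    (hM : PySem.List.max? p (fun x => x) = some M)
    (hlen : ∀ k ∈ posOf p M, k < i.length) :
    suurim_palk_alt i p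
      = (List.range (posOf p M).length).map (fun c => i.getD ((posOf p M).getD c 0) "") := by
  rw [suurim_palk_alt, hM]
  simp only []
  rw [altB_eq M p i hlen, altB_range]

-- ===== VERDICT (by name: the statement is the Claim_ definition above) =====
theorem suurim_palk_spec : Claim_unchanged_suurim_palk := by
  intro i p _hdom hpre hnD
  obtain ⟨hne, hlenMP⟩ := hpre
  cases hM : PySem.List.max? p (fun x => x) with
  | none => exact absurd ((PySem.List.max?_eq_none_iff p _).mp hM) hne
  | some M =>
    have hMP : maxPositions p = posOf p M := maxPositions_eq_posOf p M hM
    rw [hMP] at hlenMP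
    unfold D_suurim_palk at hnD
    rw [hMP] at hnD
    show suurim_palk i p = suurim_palk_alt i p
    rw [portA_eq i p M hM hlenMP, portB_eq i p M hM hlenMP]
    refine List.map_congr_left (fun c hc => ?_)
    by_cases hV : (posOf p M).dropLast
        = List.range' ((posOf p M).headD 0) ((posOf p M).length - 1)
    · rw [consecReads p M hV c (List.mem_range.mp hc)]
    · by_contra hne3
      exact hnD ⟨hV, ⟨c, hc, hne3⟩⟩

theorem suurim_palk_changed : Claim_changed_suurim_palk := by
  unfold Claim_changed_suurim_palk; decide

theorem suurim_palk_tight : Claim_exact_suurim_palk := by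
  intro i p _hdom hpre hD
  obtain ⟨hne, hlenMP⟩ := hpre
  cases hM : PySem.List.max? p (fun x => x) with
  | none => exact absurd ((PySem.List.max?_eq_none_iff p _).mp hM) hne
  | some M =>
    have hMP : maxPositions p = posOf p M := maxPositions_eq_posOf p M hM
    rw [hMP] at hlenMP
    unfold D_suurim_palk at hD
    rw [hMP] at hD
    obtain ⟨_, c, hc, hne2⟩ := hD
    have hclt : c < (posOf p M).length := List.mem_range.mp hc
    intro heq
    rw [portA_eq i p M hM hlenMP, portB_eq i p M hM hlenMP] at heq
    have := congrArg (fun l => l[c]?) heq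
    simp only [List.getElem?_map, List.getElem?_range hclt, Option.map_some] at this
    exact hne2 (by simpa using this)
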